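-- pv_equiv track=rewrite | github.com/thiagopelizoni/ProjectEuler | src/problem_105.py | find_special_sum
-- ===== SOURCE A (Python) =====
-- from itertools import combinations
--
-- def is_special_sum_set(s):
--     # Use a set to store the sum of subsets for quick 'in' checks
--     all_sums = set()
--
--     # Use a dict to store unique sum and length pairs
--     unique_combinations = {}
--
--     # Generate all possible non-empty subsets
--     for i in range(1, len(s) + 1):
--         for combo in combinations(s, i):
--             combo_sum = sum(combo)
--              # Rule 1 violation
--             if combo_sum in all_sums:
--                 return False
--
--             all_sums.add(combo_sum)
--             # Store only the smallest length for each sum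
--             if combo_sum not in unique_combinations or i < unique_combinations[combo_sum]:
--                 unique_combinations[combo_sum] = i
--
--     # Check Rule 2 by comparing the length of subsets with equal sums
--     sums = sorted(unique_combinations.keys())
--     for i in range(len(sums) - 1):
--         # Rule 2 violation
--         if unique_combinations[sums[i]] > unique_combinations[sums[i + 1]]:
--             return False
--
--     return True
--
-- def find_special_sum(sets):
--     special_sum_sets = []
--     total_sum = 0
--
--     for set_elements in sets:
--         if is_special_sum_set(set_elements):
--             special_sum_sets.append(set_elements)
--             total_sum += sum(set_elements)
--
--     return special_sum_sets, total_sum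
-- ===== SOURCE B (Python) =====
-- def find_special_sum(sets):
--     special = [s for s in sets if _is_special(s)]
--     return special, sum(map(sum, special))
--
-- def _is_special(s):
--     # enumerate (subset_sum, subset_size) for every subset by binary doubling
--     pairs = [(0, 0)]
--     for x in s:
--         pairs = pairs + [(sm + x, ln + 1) for (sm, ln) in pairs]
--     ps = sorted(pairs[1:], key=lambda p: p[0])   # non-empty subsets, ordered by sum
--     for a, b in zip(ps, ps[1:]):
--         if a[0] == b[0] or a[1] > b[1]:
--             return False
--     return True
-- ===== Notes on version B (the rewrite author's own statement) =====
-- stated objective: alternative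
-- what changed: A enumerates non-empty subsets per size via itertools.combinations with a hash set for sum collisions (early return) and a dict of minimal subset length per sum scanned over sorted keys; B enumerates (subset sum, subset size) pairs by binary doubling, sorts them once by sum, and one adjacent-pair scan decides both rules; B has no early exit, so it is slower on large sets where A stops at an early collision.
import Mathlib
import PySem

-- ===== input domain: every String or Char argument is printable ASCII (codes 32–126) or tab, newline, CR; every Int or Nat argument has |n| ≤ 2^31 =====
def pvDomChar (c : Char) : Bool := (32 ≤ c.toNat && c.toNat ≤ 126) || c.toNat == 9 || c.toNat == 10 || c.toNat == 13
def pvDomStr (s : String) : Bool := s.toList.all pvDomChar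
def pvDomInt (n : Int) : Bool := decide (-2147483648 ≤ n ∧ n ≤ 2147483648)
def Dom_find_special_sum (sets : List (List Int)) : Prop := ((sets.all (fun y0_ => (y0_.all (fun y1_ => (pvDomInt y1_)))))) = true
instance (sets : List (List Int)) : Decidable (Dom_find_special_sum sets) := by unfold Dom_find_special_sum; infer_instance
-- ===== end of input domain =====

-- B replaces A's per-size combinations enumeration + hash set + min-length dict by a binary-doubling
-- enumeration of (subset sum, subset size) pairs, one sort by sum, and one adjacent-pair scan
-- (alternative decomposition, same exponential worst case; B has no early exit).

-- ===== PORT A =====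
-- literal port of is_special_sum_set; the early 'return False' inside the nested loops is the 'none' state
def isSpecialA (s : List Int) : Bool :=
  let st :=
    (PySem.List.pyRange 1 ((s.length : Int) + 1) 1).foldl
      (fun st i =>
        -- i ranges over 1..len(s), so i.toNat is exact
        (PySem.List.combinations s i.toNat).foldl
          (fun st combo =>
            match st with
            | none => none
            | some (all_sums, uc) =>
              let cs := combo.sum
              if PySem.Set.contains all_sums cs then none   -- Rule 1 violation: return False
              else
                some (PySem.Set.add all_sums cs,
                      -- 'combo_sum not in uc or i < uc[combo_sum]' (short-circuit makes the getD lookup safe)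
                      if !(uc.contains cs) || decide (i < uc.getD cs 0) then uc.insert cs i else uc))
          st)
      (some ((PySem.Set.empty : PySem.Set Int), (PySem.Dict.empty : PySem.Dict Int Int)))
  match st with
  | none => false
  | some (_, uc) =>
    let sums := PySem.List.sorted uc.keys (fun x => x) false
    -- 'for i in range(len(sums)-1): if uc[sums[i]] > uc[sums[i+1]]: return False' (keys of uc, so getD is exact)
    (PySem.List.pyRange 0 ((sums.length : Int) - 1) 1).foldl
      (fun ok i =>
        if uc.getD (PySem.List.pyGetD sums i 0) 0 > uc.getD (PySem.List.pyGetD sums (i + 1) 0) 0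
        then false else ok)
      true

def find_special_sum (sets : List (List Int)) : List (List Int) × Int :=
  sets.foldl
    (fun acc set_elements =>
      if isSpecialA set_elements then (acc.1 ++ [set_elements], acc.2 + set_elements.sum) else acc)
    ([], 0)

-- ===== PORT B =====
def isSpecialB (s : List Int) : Bool :=
  let pairs := s.foldl (fun acc x => acc ++ acc.map (fun p => (p.1 + x, p.2 + 1))) [((0 : Int), (0 : Int))]
  let ps := PySem.List.sorted (PySem.List.slice pairs (some 1) none) (fun p => p.1) false
  !((ps.zip (PySem.List.slice ps (some 1) none)).any (fun q => q.1.1 == q.2.1 || decide (q.1.2 > q.2.2)))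

def find_special_sum_alt (sets : List (List Int)) : List (List Int) × Int :=
  let special := sets.filter (fun s => isSpecialB s)
  (special, (special.map (fun s => s.sum)).sum)

-- ===== PRECONDITION & SPEC =====
def Spec_find_special_sum (sets : List (List Int)) (out : List (List Int) × Int) : Prop := out = find_special_sum_alt sets
instance (sets : List (List Int)) (out : List (List Int) × Int) : Decidable (Spec_find_special_sum sets out) := by unfold Spec_find_special_sum; infer_instance

-- ===== CLAIM (what is proved, stated in full; the proofs are below) =====
def Claim_equal_find_special_sum : Prop := ∀ (sets : List (List Int)), Dom_find_special_sum sets → Spec_find_special_sum sets (find_special_sum sets)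

-- ===== LEMMAS AND PROOFS =====

-- abbreviations for the proofs (not used by the ports)
def pvShift (x : Int) (p : Int × Int) : Int × Int := (p.1 + x, p.2 + 1)

def pvStepA (q : (Int × Int)) (st : Option (PySem.Set Int × PySem.Dict Int Int)) :
    Option (PySem.Set Int × PySem.Dict Int Int) :=
  match st with
  | none => none
  | some (all_sums, uc) =>
    if PySem.Set.contains all_sums q.1 then none
    else
      some (PySem.Set.add all_sums q.1,
            if !(uc.contains q.1) || decide (q.2 < uc.getD q.1 0) then uc.insert q.1 q.2 else uc)

-- A's enumeration of (subset sum, subset length): sizes 1..n, combinations within a size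
def pvBi (t : List Int) (i : Nat) : List (Int × Int) :=
  (PySem.List.combinations t i).map (fun c => (c.sum, (i : Int)))

def pvEnumA (s : List Int) : List (Int × Int) :=
  (List.range s.length).flatMap (fun k => pvBi s (k + 1))

def pvN (s : List Int) : List (Int × Int) :=
  (List.range (s.length + 1)).flatMap (fun i => pvBi s i)

-- B's enumeration, foldr-style
def pvSubsT : List Int → List (Int × Int)
  | [] => [(0, 0)]
  | x :: t => pvSubsT t ++ (pvSubsT t).map (pvShift x)


-- none is absorbing for A's per-subset step
theorem pvRun_none (l : List (Int × Int)) : l.foldl (fun st q => pvStepA q st) none = none := by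
  induction l with
  | nil => rfl
  | cons q t ih => simpa [pvStepA] using ih

-- A's successful run from a dict with nodup keys: the set mirrors the keys, the dict collects the pairs
theorem pvRun (l : List (Int × Int)) (uc : PySem.Dict Int Int) (hnd : uc.keys.Nodup) :
    l.foldl (fun st q => pvStepA q st) (some (uc.keys, uc)) =
      if (uc.keys ++ l.map Prod.fst).Nodup
      then some (uc.keys ++ l.map Prod.fst, PySem.Dict.mk (uc.items ++ l))
      else none := by
  induction l generalizing uc with
  | nil => simp [hnd]
  | cons q t ih =>
    rw [List.foldl_cons]
    by_cases hc : q.1 ∈ uc.keys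
    · have hstep : pvStepA q (some (uc.keys, uc)) = none := by
        simp [pvStepA, PySem.Set.contains, hc]
      rw [hstep, pvRun_none, if_neg]
      intro hnodup
      rw [List.nodup_append] at hnodup
      exact hnodup.2.2 q.1 hc q.1 (by simp) rfl
    · have hduc : uc.contains q.1 = false := by
        rw [PySem.Dict.contains_eq_decide_mem_keys]
        simp [hc]
      have hstep : pvStepA q (some (uc.keys, uc)) = some (uc.keys ++ [q.1], uc.insert q.1 q.2) := by
        simp [pvStepA, PySem.Set.contains, PySem.Set.add, hc, hduc]
      rw [hstep]
      have hkeys : (uc.insert q.1 q.2).keys = uc.keys ++ [q.1] :=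
        PySem.Dict.keys_insert_of_not_contains uc q.2 hduc
      have hitems : (uc.insert q.1 q.2).items = uc.items ++ [(q.1, q.2)] :=
        PySem.Dict.items_insert_of_not_contains uc q.2 hduc
      have hnd' : (uc.insert q.1 q.2).keys.Nodup := by
        rw [hkeys]
        simp only [List.nodup_append, List.nodup_singleton, true_and]
        refine ⟨hnd, fun a ha b hb h => ?_⟩
        simp only [List.mem_singleton] at hb
        exact hc (hb ▸ h ▸ ha)
      have hIH := ih (uc.insert q.1 q.2) hnd'
      rw [hkeys, hitems] at hIH
      rw [show (some (uc.keys ++ [q.1], uc.insert q.1 q.2) : Option (PySem.Set Int × PySem.Dict Int Int))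
            = some ((uc.insert q.1 q.2).keys, uc.insert q.1 q.2) by rw [hkeys], hkeys, hIH]
      have e1 : (uc.keys ++ [q.1]) ++ t.map Prod.fst = uc.keys ++ (q :: t).map Prod.fst := by simp
      have e2 : (uc.items ++ [(q.1, q.2)]) ++ t = uc.items ++ q :: t := by simp
      rw [e1, e2]

-- A's nested loops are one fold of pvStepA over pvEnumA
theorem pvA_fold (s : List Int) (init : Option (PySem.Set Int × PySem.Dict Int Int)) :
    (PySem.List.pyRange 1 ((s.length : Int) + 1) 1).foldl
      (fun st i =>
        (PySem.List.combinations s i.toNat).foldl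
          (fun st combo => pvStepA (combo.sum, i) st) st) init
    = (pvEnumA s).foldl (fun st q => pvStepA q st) init := by
  rw [PySem.List.pyRange_one]
  have h1 : ((s.length : Int) + 1 - 1).toNat = s.length := by omega
  rw [h1, List.foldl_map]
  unfold pvEnumA
  rw [List.foldl_flatMap]
  apply PySem.List.foldl_congr_mem
  intro st k _
  have hk : (1 : Int) + (k : Int) = ((k + 1 : Nat) : Int) := by push_cast; ring
  rw [hk, Int.toNat_natCast]
  unfold pvBi
  rw [List.foldl_map]

-- rule-2 part of A, applied to a dict
def pvRule2D (uc : PySem.Dict Int Int) : Bool :=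
  let sums := PySem.List.sorted uc.keys (fun x => x) false
  (PySem.List.pyRange 0 ((sums.length : Int) - 1) 1).foldl
    (fun ok i =>
      if uc.getD (PySem.List.pyGetD sums i 0) 0 > uc.getD (PySem.List.pyGetD sums (i + 1) 0) 0
      then false else ok)
    true

def pvRule2A (l : List (Int × Int)) : Bool := pvRule2D (PySem.Dict.mk l)

theorem pvA_char (s : List Int) :
    isSpecialA s =
      if ((pvEnumA s).map Prod.fst).Nodup then pvRule2A (pvEnumA s) else false := by
  unfold isSpecialA
  show (match (PySem.List.pyRange 1 ((s.length : Int) + 1) 1).foldl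
      (fun st i =>
        (PySem.List.combinations s i.toNat).foldl
          (fun st combo => pvStepA (combo.sum, i) st) st)
      (some ((PySem.Set.empty : PySem.Set Int), (PySem.Dict.empty : PySem.Dict Int Int))) with
    | none => false
    | some (_, uc) => pvRule2D uc) = _
  rw [pvA_fold]
  rw [show (some ((PySem.Set.empty : PySem.Set Int), (PySem.Dict.empty : PySem.Dict Int Int)))
        = some ((PySem.Dict.empty : PySem.Dict Int Int).keys, (PySem.Dict.empty : PySem.Dict Int Int)) from rfl]
  rw [pvRun _ _ (by simp [PySem.Dict.empty, PySem.Dict.keys])]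
  have hke : (PySem.Dict.empty : PySem.Dict Int Int).keys = [] := rfl
  have hie : (PySem.Dict.empty : PySem.Dict Int Int).items = [] := rfl
  rw [hke, hie, List.nil_append, List.nil_append]
  by_cases hd : ((pvEnumA s).map Prod.fst).Nodup
  · rw [if_pos hd, if_pos hd]
    rfl
  · rw [if_neg hd, if_neg hd]

def pvDbl (acc : List (Int × Int)) (x : Int) : List (Int × Int) := acc ++ acc.map (pvShift x)

def pvFrom (l : List Int) (p : Int × Int) : List (Int × Int) :=
  (pvSubsT l).map (fun q => (p.1 + q.1, p.2 + q.2))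

theorem pvRunDbl (l : List Int) (acc : List (Int × Int)) :
    (l.foldl pvDbl acc).Perm (acc.flatMap (pvFrom l)) := by
  induction l generalizing acc with
  | nil =>
    have h0 : pvFrom [] = fun p => [p] := by
      funext p
      simp [pvFrom, pvSubsT]
    simp [h0]
  | cons x t ih =>
    have hfun : (fun p => pvFrom t p ++ pvFrom t (pvShift x p)) = pvFrom (x :: t) := by
      funext p
      show _ = (pvSubsT t ++ (pvSubsT t).map (pvShift x)).map _
      rw [List.map_append, List.map_map]
      unfold pvFrom
      congr 1
      apply List.map_congr_left
      intro q _
      exact Prod.ext (by simp [pvShift]; ring) (by simp [pvShift]; ring)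
    show (t.foldl pvDbl (pvDbl acc x)).Perm _
    refine (ih (pvDbl acc x)).trans ?_
    rw [pvDbl, List.flatMap_append, List.flatMap_map]
    refine (List.flatMap_append_perm acc (pvFrom t) (fun a => pvFrom t (pvShift x a))).trans ?_
    rw [hfun]

theorem pvBi_zero (u : List Int) : pvBi u 0 = [(0, 0)] := by
  simp [pvBi, PySem.List.combinations_zero]

theorem pvBi_succ (x : Int) (t : List Int) (i : Nat) :
    pvBi (x :: t) (i + 1) = (pvBi t i).map (pvShift x) ++ pvBi t (i + 1) := by
  unfold pvBi
  rw [PySem.List.combinations_cons_succ, List.map_append, List.map_map, List.map_map]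
  congr 1
  apply List.map_congr_left
  intro c _
  simp only [Function.comp, pvShift, List.sum_cons]
  refine Prod.ext (by ring) (by push_cast; ring)

theorem pvSubsT_perm_N (s : List Int) : (pvSubsT s).Perm (pvN s) := by
  induction s with
  | nil => simp [pvSubsT, pvN, pvBi_zero]
  | cons x t ih =>
    have hsplit : pvN (x :: t) =
        [((0 : Int), (0 : Int))] ++ (List.range (t.length + 1)).flatMap (fun i => pvBi (x :: t) (i + 1)) := by
      unfold pvN
      rw [List.length_cons, List.range_succ_eq_map, List.flatMap_cons, pvBi_zero, List.flatMap_map]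
      try simp [Nat.succ_eq_add_one]
    have hback : [((0 : Int), (0 : Int))] ++ (List.range (t.length + 1)).flatMap (fun i => pvBi t (i + 1)) = pvN t := by
      have h3 : (List.range (t.length + 1 + 1)).flatMap (fun i => pvBi t i)
          = [((0 : Int), (0 : Int))] ++ (List.range (t.length + 1)).flatMap (fun i => pvBi t (i + 1)) := by
        rw [List.range_succ_eq_map, List.flatMap_cons, pvBi_zero, List.flatMap_map]
        try simp [Nat.succ_eq_add_one]
      have h4 : (List.range (t.length + 1 + 1)).flatMap (fun i => pvBi t i)
          = pvN t ++ pvBi t (t.length + 1) := by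
        rw [List.range_succ, List.flatMap_append, pvN]; simp
      have hlt : t.length < t.length + 1 := by omega
      rw [← h3, h4, pvBi, PySem.List.combinations_eq_nil_of_length_lt t hlt]
      simp
    have h1 : ((List.range (t.length + 1)).flatMap (fun i => pvBi (x :: t) (i + 1))).Perm
        ((List.range (t.length + 1)).flatMap (fun i => (pvBi t i).map (pvShift x))
          ++ (List.range (t.length + 1)).flatMap (fun i => pvBi t (i + 1))) := by
      refine List.Perm.trans ?_ (List.flatMap_append_perm _ _ _).symm
      simp only [pvBi_succ]
      exact List.Perm.refl _
    have h2 : (List.range (t.length + 1)).flatMap (fun i => (pvBi t i).map (pvShift x))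
        = (pvN t).map (pvShift x) := by
      rw [pvN, List.map_flatMap]
    show (pvSubsT t ++ (pvSubsT t).map (pvShift x)).Perm (pvN (x :: t))
    refine (ih.append (ih.map (pvShift x))).trans ?_
    rw [hsplit]
    have heq : pvN t ++ (pvN t).map (pvShift x)
        = [((0 : Int), (0 : Int))] ++ ((List.range (t.length + 1)).flatMap (fun i => pvBi t (i + 1))
            ++ (pvN t).map (pvShift x)) := by
      rw [← List.append_assoc, hback]
    rw [heq]
    refine List.Perm.append_left _ ?_
    refine (List.perm_append_comm).trans ?_
    rw [← h2]
    exact h1.symm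

theorem pvN_cons0 (s : List Int) : pvN s = (0, 0) :: pvEnumA s := by
  unfold pvN pvEnumA
  rw [List.range_succ_eq_map, List.flatMap_cons, pvBi_zero, List.flatMap_map]
  simp [Nat.succ_eq_add_one]

theorem pvDbl_prefix (l : List Int) (acc : List (Int × Int)) : acc <+: l.foldl pvDbl acc := by
  induction l generalizing acc with
  | nil => exact List.prefix_rfl
  | cons x t ih => exact List.prefix_append acc _ |>.trans (ih _)

theorem pvTail (s : List Int) :
    ∃ tl, s.foldl pvDbl [((0 : Int), (0 : Int))] = (0, 0) :: tl ∧ tl.Perm (pvEnumA s) := by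
  obtain ⟨r, hr⟩ := pvDbl_prefix s [((0 : Int), (0 : Int))]
  have hfold : s.foldl pvDbl [((0 : Int), (0 : Int))] = (0, 0) :: r := by
    rw [← hr]; rfl
  refine ⟨r, hfold, ?_⟩
  have hperm : (s.foldl pvDbl [((0 : Int), (0 : Int))]).Perm ((0, 0) :: pvEnumA s) := by
    refine (pvRunDbl s _).trans ?_
    rw [← pvN_cons0]
    have h1 : List.flatMap (pvFrom s) [((0 : Int), (0 : Int))] = pvFrom s (0, 0) := by simp
    rw [h1]
    have h2 : pvFrom s (0, 0) = pvSubsT s := by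
      unfold pvFrom
      simp
    rw [h2]
    exact pvSubsT_perm_N s
  rw [hfold] at hperm
  exact hperm.cons_inv

-- in a list sorted by first component, a duplicated first component shows up adjacently
theorem pvDupAdj (ps : List (Int × Int)) (hs : ps.Pairwise (fun a b => a.1 ≤ b.1))
    (hd : ¬ (ps.map Prod.fst).Nodup) :
    (ps.zip ps.tail).any (fun q => q.1.1 == q.2.1 || decide (q.1.2 > q.2.2)) = true := by
  induction ps with
  | nil => simp at hd
  | cons a t ih =>
    cases t with
    | nil => simp at hd
    | cons b r =>
      rw [List.tail_cons, List.zip_cons_cons, List.any_cons]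
      by_cases hab : a.1 = b.1
      · simp [hab]
      · have hs' : (b :: r).Pairwise (fun x y => x.1 ≤ y.1) := hs.of_cons
        have hd' : ¬ ((b :: r).map Prod.fst).Nodup := by
          intro hn
          apply hd
          rw [List.map_cons, List.nodup_cons]
          refine ⟨?_, hn⟩
          intro hmem
          rcases List.mem_map.mp hmem with ⟨c, hc, hceq⟩
          have hab' : a.1 ≤ b.1 := (List.pairwise_cons.mp hs).1 b (by simp)
          have hbc : b.1 ≤ c.1 := by
            rcases List.mem_cons.mp hc with h | h
            · rw [h]
            · exact (List.pairwise_cons.mp hs').1 c h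
          exact hab (le_antisymm hab' (hceq ▸ hbc))
        have hrec := ih hs' hd'
        rw [List.tail_cons] at hrec
        simp [hrec]

-- rule-2 scan of A over the sorted keys equals B's adjacent scan of the sorted pairs (nodup case)
theorem pvScan (l tl : List (Int × Int)) (hd : (l.map Prod.fst).Nodup) (hperm : tl.Perm l) :
    pvRule2A l =
      !(((PySem.List.sorted tl (fun p => p.1) false).zip
          (PySem.List.sorted tl (fun p => p.1) false).tail).any
        (fun q => q.1.1 == q.2.1 || decide (q.1.2 > q.2.2))) := by
  have hkeys : (PySem.Dict.mk l).keys = l.map Prod.fst := rfl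
  have hitems : (PySem.Dict.mk l).items = l := rfl
  have hndk : (PySem.Dict.mk l).keys.Nodup := by rw [hkeys]; exact hd
  have hsumsnd : (PySem.List.sorted (l.map Prod.fst) (fun x => x) false).Nodup :=
    ((PySem.List.sorted_perm (l.map Prod.fst) (fun x => x) false).nodup_iff).mpr hd
  have hsumlt : (PySem.List.sorted (l.map Prod.fst) (fun x => x) false).Pairwise (· < ·) := by
    have hle := PySem.List.sorted_pairwise (l.map Prod.fst) (fun x => x)
    exact (hle.and hsumsnd).imp (fun h => lt_of_le_of_ne h.1 h.2)
  set sums := PySem.List.sorted (l.map Prod.fst) (fun x => x) false with hsums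
  set ys := sums.map (fun k => (k, (PySem.Dict.mk l).getD k 0)) with hys
  have hylen : ys.length = sums.length := by rw [hys, List.length_map]
  have hyslt : ys.Pairwise (fun a b => a.1 < b.1) := by
    rw [hys, List.pairwise_map]
    exact hsumlt
  have hysperm : ys.Perm tl := by
    have h1 := PySem.Dict.items_eq_map_keys (PySem.Dict.mk l) hndk 0
    rw [hitems, hkeys] at h1
    have h2 : ys.Perm ((l.map Prod.fst).map (fun k => (k, (PySem.Dict.mk l).getD k 0))) :=
      (PySem.List.sorted_perm (l.map Prod.fst) (fun x => x) false).map _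
    rw [← h1] at h2
    exact h2.trans hperm.symm
  have hsorted_eq : PySem.List.sorted tl (fun p => p.1) false = ys :=
    PySem.List.sorted_eq_of_perm_of_pairwise_lt tl ys (fun p => p.1) hysperm hyslt
  rw [hsorted_eq]
  simp only [pvRule2A, pvRule2D]
  rw [hkeys, ← hsums]
  rw [PySem.List.foldl_ite_false_eq
        (p := fun i => (PySem.Dict.mk l).getD (PySem.List.pyGetD sums i 0) 0
          > (PySem.Dict.mk l).getD (PySem.List.pyGetD sums (i + 1) 0) 0),
      Bool.true_and]
  congr 1
  rw [Bool.eq_iff_iff]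
  simp only [List.any_eq_true, decide_eq_true_eq]
  constructor
  · rintro ⟨i, hi, hgt⟩
    rw [PySem.List.mem_pyRange_one] at hi
    obtain ⟨h0, h1⟩ := hi
    have hb1 : i.toNat + 1 < sums.length := by omega
    have hk1 : (i + 1).toNat = i.toNat + 1 := by omega
    rw [PySem.List.pyGetD_eq_getElem sums 0 h0 (by omega),
        PySem.List.pyGetD_eq_getElem sums 0 (by omega : (0:Int) ≤ i + 1) (by omega)] at hgt
    simp only [hk1] at hgt
    have hzlen : i.toNat < (ys.zip ys.tail).length := by
      rw [List.length_zip, List.length_tail, hylen]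
      omega
    refine ⟨(ys.zip ys.tail)[i.toNat], List.getElem_mem hzlen, ?_⟩
    rw [List.getElem_zip, List.getElem_tail]
    have e1 : ys[i.toNat]'(by omega) = (sums[i.toNat]'(by omega), (PySem.Dict.mk l).getD (sums[i.toNat]'(by omega)) 0) := by
      simp only [hys]; exact List.getElem_map _
    have e2 : ys[i.toNat + 1]'(by omega) = (sums[i.toNat + 1]'(by omega), (PySem.Dict.mk l).getD (sums[i.toNat + 1]'(by omega)) 0) := by
      simp only [hys]; exact List.getElem_map _
    rw [e1, e2]
    simp [hgt]
  · rintro ⟨q, hq, hfq⟩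
    obtain ⟨k, hklen, hkeq⟩ := List.mem_iff_getElem.mp hq
    have hklen' : k + 1 < sums.length := by
      rw [List.length_zip, List.length_tail, hylen] at hklen
      omega
    have hkz : (ys.zip ys.tail)[k]'hklen = (ys[k]'(by omega), ys[k+1]'(by omega)) := by
      rw [List.getElem_zip, List.getElem_tail]
    rw [← hkeq, hkz] at hfq
    have e1 : ys[k]'(by omega) = (sums[k]'(by omega), (PySem.Dict.mk l).getD (sums[k]'(by omega)) 0) := by
      simp only [hys]; exact List.getElem_map _
    have e2 : ys[k + 1]'(by omega) = (sums[k + 1]'(by omega), (PySem.Dict.mk l).getD (sums[k + 1]'(by omega)) 0) := by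
      simp only [hys]; exact List.getElem_map _
    rw [e1, e2, Bool.or_eq_true] at hfq
    have hlt : sums[k]'(by omega) < sums[k + 1]'(by omega) :=
      (List.pairwise_iff_getElem.mp hsumlt) k (k + 1) (by omega) (by omega) (by omega)
    cases hfq with
    | inl hbeq =>
      rw [beq_iff_eq] at hbeq
      exact absurd hbeq (ne_of_lt hlt)
    | inr hgt =>
      rw [decide_eq_true_eq] at hgt
      refine ⟨(k : Int), ?_, ?_⟩
      · rw [PySem.List.mem_pyRange_one]
        constructor <;> omega
      · have ht0 : ((k : Int)).toNat = k := by omega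
        have ht1 : ((k : Int) + 1).toNat = k + 1 := by omega
        rw [PySem.List.pyGetD_eq_getElem sums 0 (by omega) (by omega),
            PySem.List.pyGetD_eq_getElem sums 0 (by omega : (0:Int) ≤ (k : Int) + 1) (by omega)]
        simp only [ht0, ht1]
        exact hgt

-- the central per-set fact: A's verdict equals B's verdict
theorem pvMain (s : List Int) : isSpecialA s = isSpecialB s := by
  obtain ⟨tl, hfold, hperm⟩ := pvTail s
  have hB : isSpecialB s =
      !(((PySem.List.sorted tl (fun p => p.1) false).zip
          (PySem.List.sorted tl (fun p => p.1) false).tail).any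
        (fun q => q.1.1 == q.2.1 || decide (q.1.2 > q.2.2))) := by
    show (!(((PySem.List.sorted (PySem.List.slice (s.foldl pvDbl [((0 : Int), (0 : Int))]) (some 1) none) (fun p => p.1) false).zip
        (PySem.List.slice (PySem.List.sorted (PySem.List.slice (s.foldl pvDbl [((0 : Int), (0 : Int))]) (some 1) none) (fun p => p.1) false) (some 1) none)).any
        (fun q => q.1.1 == q.2.1 || decide (q.1.2 > q.2.2))))
      = (!(((PySem.List.sorted tl (fun p => p.1) false).zip
          (PySem.List.sorted tl (fun p => p.1) false).tail).any
        (fun q => q.1.1 == q.2.1 || decide (q.1.2 > q.2.2))))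
    rw [PySem.List.slice_from_one, PySem.List.slice_from_one, hfold, List.tail_cons]
  rw [pvA_char s, hB]
  by_cases hd : ((pvEnumA s).map Prod.fst).Nodup
  · rw [if_pos hd]
    exact pvScan (pvEnumA s) tl hd hperm
  · rw [if_neg hd]
    have hp : ¬ ((PySem.List.sorted tl (fun p => p.1) false).map Prod.fst).Nodup := by
      intro hn
      exact hd (((((PySem.List.sorted_perm tl (fun p => p.1) false).trans hperm).map Prod.fst).nodup_iff).mp hn)
    rw [pvDupAdj _ (PySem.List.sorted_pairwise tl (fun p => p.1)) hp]
    rfl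

theorem pvOuter (sets : List (List Int)) (acc : List (List Int) × Int) :
    sets.foldl
      (fun acc set_elements =>
        if isSpecialA set_elements then (acc.1 ++ [set_elements], acc.2 + set_elements.sum) else acc)
      acc
    = (acc.1 ++ sets.filter (fun s => isSpecialB s),
       acc.2 + ((sets.filter (fun s => isSpecialB s)).map (fun s => s.sum)).sum) := by
  induction sets generalizing acc with
  | nil => simp
  | cons s t ih =>
    rw [List.foldl_cons, ih]
    by_cases h : isSpecialB s
    · simp [pvMain s, h, add_assoc]
    · simp [pvMain s, h]

-- ===== VERDICT (by name: the statement is the Claim_ definition above) =====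
theorem find_special_sum_spec : Claim_equal_find_special_sum := by
  intro sets _
  unfold Spec_find_special_sum find_special_sum find_special_sum_alt
  rw [pvOuter]
  simp
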